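-- pv_equiv track=rewrite | github.com/TRVRafael/DIC_Manager | base/shared_modules/utils.py | formatar_mensagem_integrantes
-- ===== SOURCE A (Python) =====
-- def obter_cargo_nome(cargo_id):
--     """
--     Obter o nome do cargo a partir do contador.
--
--     Args:
--         cargo_id (int): Id do cargo.
--
--     Returns:
--         str: Nome do cargo.
--     """
--     cargos_dicionario = {
--         1: "Membro",
--         2: "Auxiliar",
--         3: "Sub-Líder",
--         4: "Vice/Líder",
--         5: "CORE",
--         6: "Comando",
--         7: "Presidência"
--     }
--     return cargos_dicionario[cargo_id]
--
-- def formatar_mensagem_integrantes(integrantes: list[tuple[str, int, str]]) -> str: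
--     """
--     Formata a mensagem de integrantes para ser enviada.
--
--     Args: integrantes (list[tuple[str, int, str]]): Lista de todos os integrantes do chat, no formato (nick,
--     cargo_id, cargo_nome).
--
--     Returns:
--         str: Mensagem formatada com os integrantes e seus cargos.
--     """
--     mensagem = "Integrantes do chat:\n"
--
--     #integrantes_agrupados = groupby(integrantes, key=lambda x: x[1])
--     contador = 1
--
--     while contador <= 7:
--         cargo_nome = obter_cargo_nome(contador)
--         vazio = True
--         mensagem += f"<b>\n{cargo_nome}</b>:\n"
--         for integrante in integrantes:
--             if integrante[1] == contador:
--                 mensagem += f"    • {integrante[0]}\n"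
--                 vazio = False
--
--         if vazio:
--             mensagem += "-x-\n"
--
--         contador += 1
--
--     return mensagem
-- ===== SOURCE B (Python) =====
-- def obter_cargo_nome(cargo_id):
--     cargos_dicionario = {
--         1: "Membro",
--         2: "Auxiliar",
--         3: "Sub-Líder",
--         4: "Vice/Líder",
--         5: "CORE",
--         6: "Comando",
--         7: "Presidência"
--     }
--     return cargos_dicionario[cargo_id]
--
--
-- def formatar_mensagem_integrantes(integrantes: list[tuple[str, int, str]]) -> str:
--     # Build an index role_id -> members once, then emit with a single pass per role.
--     grupos = {}
--     for nick, cargo_id, _ in integrantes: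
--         grupos.setdefault(cargo_id, []).append(nick)
--
--     mensagem = "Integrantes do chat:\n"
--     for contador in range(1, 8):
--         mensagem += f"<b>\n{obter_cargo_nome(contador)}</b>:\n"
--         membros = grupos.get(contador, [])
--         for nick in membros:
--             mensagem += f"    • {nick}\n"
--         if not membros:
--             mensagem += "-x-\n"
--     return mensagem
-- ===== Notes on version B (the rewrite author's own statement) =====
-- stated objective: simpler
-- what changed: B builds a dict index cargo_id -> [nicks] in one pass and then emits each role group directly over range(1,8), instead of A's while-loop that rescans the whole member list once per role.
import Mathlib
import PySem

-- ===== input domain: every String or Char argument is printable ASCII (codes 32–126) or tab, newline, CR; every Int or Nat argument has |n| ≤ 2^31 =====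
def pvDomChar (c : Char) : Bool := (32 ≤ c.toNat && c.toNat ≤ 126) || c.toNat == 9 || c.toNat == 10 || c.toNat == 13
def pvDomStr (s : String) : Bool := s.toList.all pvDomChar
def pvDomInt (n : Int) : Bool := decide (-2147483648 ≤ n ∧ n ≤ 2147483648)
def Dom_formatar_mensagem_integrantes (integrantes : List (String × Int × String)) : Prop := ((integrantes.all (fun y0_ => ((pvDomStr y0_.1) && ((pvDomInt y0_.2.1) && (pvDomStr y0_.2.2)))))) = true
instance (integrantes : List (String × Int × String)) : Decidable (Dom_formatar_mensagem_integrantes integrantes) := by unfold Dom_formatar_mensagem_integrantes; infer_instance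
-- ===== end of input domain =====

-- B replaces A's per-role rescans of the whole member list by one dict-index pass followed by a single emit pass per role (simpler/alternative structure; same return value).


-- ===== PORT A =====
-- shared module helper; `.getD ""` stands for the KeyError branch, unreachable at the only
-- call sites (contador ∈ 1..7, all present in the dict)
def obter_cargo_nome (cargo_id : Int) : String :=
  let cargos_dicionario : PySem.Dict Int String := PySem.Dict.ofList
    [(1, "Membro"), (2, "Auxiliar"), (3, "Sub-Líder"), (4, "Vice/Líder"),
     (5, "CORE"), (6, "Comando"), (7, "Presidência")]
  (cargos_dicionario.get? cargo_id).getD ""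

-- `while contador <= 7` with contador starting at 1 and incremented each pass = fold over pyRange 1 8 1
def formatar_mensagem_integrantes (integrantes : List (String × Int × String)) : String :=
  let mensagem := "Integrantes do chat:\n"
  (PySem.List.pyRange 1 8 1).foldl
    (fun mensagem contador =>
      let cargo_nome := obter_cargo_nome contador
      let mv := integrantes.foldl
        (fun (mv : String × Bool) integrante =>
          if integrante.2.1 == contador then (mv.1 ++ "    • " ++ integrante.1 ++ "\n", false) else mv)
        (mensagem ++ "<b>\n" ++ cargo_nome ++ "</b>:\n", true)
      if mv.2 then mv.1 ++ "-x-\n" else mv.1)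
    mensagem

-- ===== PORT B =====
def formatar_mensagem_integrantes_alt (integrantes : List (String × Int × String)) : String :=
  let grupos := integrantes.foldl (fun d t => d.modify t.2.1 [] (· ++ [t.1]))
    (PySem.Dict.empty : PySem.Dict Int (List String))
  (PySem.List.pyRange 1 8 1).foldl
    (fun mensagem contador =>
      let mensagem := mensagem ++ "<b>\n" ++ obter_cargo_nome contador ++ "</b>:\n"
      let membros := grupos.getD contador []
      let mensagem := membros.foldl (fun m nick => m ++ "    • " ++ nick ++ "\n") mensagem
      if membros.isEmpty then mensagem ++ "-x-\n" else mensagem)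
    "Integrantes do chat:\n"

-- ===== PRECONDITION & SPEC =====
def Spec_formatar_mensagem_integrantes (integrantes : List (String × Int × String)) (out : String) : Prop := out = formatar_mensagem_integrantes_alt integrantes
instance (integrantes : List (String × Int × String)) (out : String) : Decidable (Spec_formatar_mensagem_integrantes integrantes out) := by unfold Spec_formatar_mensagem_integrantes; infer_instance

-- ===== CLAIM (what is proved, stated in full; the proofs are below) =====
def Claim_equal_formatar_mensagem_integrantes : Prop := ∀ (integrantes : List (String × Int × String)), Dom_formatar_mensagem_integrantes integrantes → Spec_formatar_mensagem_integrantes integrantes (formatar_mensagem_integrantes integrantes)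

-- ===== LEMMAS AND PROOFS =====

-- A's inner scan over the whole list = a plain bullet fold over the members of role c,
-- with the vazio flag equal to "no member of role c".
theorem pv_inner_eq (c : Int) (l : List (String × Int × String)) : ∀ (m : String) (v : Bool),
    l.foldl
      (fun (mv : String × Bool) t =>
        if t.2.1 == c then (mv.1 ++ "    • " ++ t.1 ++ "\n", false) else mv) (m, v)
    = (((l.filter (fun t => t.2.1 == c)).map (·.1)).foldl
        (fun m nick => m ++ "    • " ++ nick ++ "\n") m,
       v && (l.filter (fun t => t.2.1 == c)).isEmpty) := by
  induction l with
  | nil => simp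
  | cons t l ih =>
    intro m v
    by_cases h : t.2.1 = c
    · simpa [h, List.filter_cons]
        using ih (m ++ "    • " ++ t.1 ++ "\n") false
    · simpa [h, List.filter_cons] using ih m v

-- B's index: the group stored under key c is exactly the nicks of role c, in order.
theorem pv_grupos_getD (c : Int) (l : List (String × Int × String)) :
    ∀ (d : PySem.Dict Int (List String)),
      (l.foldl (fun d t => d.modify t.2.1 [] (· ++ [t.1])) d).getD c []
      = d.getD c [] ++ (l.filter (fun t => t.2.1 == c)).map (·.1) := by
  induction l with
  | nil => simp
  | cons t l ih =>
    intro d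
    by_cases h : t.2.1 = c
    · rw [List.foldl_cons, ih, PySem.Dict.getD_modify]
      simp [h]
    · rw [List.foldl_cons, ih, PySem.Dict.getD_modify]
      simp [h]
      exact fun hc => absurd hc.symm h


-- the two per-role emission bodies agree, hence the folds over the role range agree
theorem pv_fold_eq (integrantes : List (String × Int × String))
    (grupos : PySem.Dict Int (List String))
    (hg : ∀ c, grupos.getD c [] = (integrantes.filter (fun t => t.2.1 == c)).map (·.1))
    (rng : List Int) : ∀ (m : String),
    rng.foldl
      (fun mensagem contador =>
        let cargo_nome := obter_cargo_nome contador
        let mv := integrantes.foldl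
          (fun (mv : String × Bool) integrante =>
            if integrante.2.1 == contador then (mv.1 ++ "    • " ++ integrante.1 ++ "\n", false) else mv)
          (mensagem ++ "<b>\n" ++ cargo_nome ++ "</b>:\n", true)
        if mv.2 then mv.1 ++ "-x-\n" else mv.1) m
    = rng.foldl
      (fun mensagem contador =>
        let mensagem := mensagem ++ "<b>\n" ++ obter_cargo_nome contador ++ "</b>:\n"
        let membros := grupos.getD contador []
        let mensagem := membros.foldl (fun m nick => m ++ "    • " ++ nick ++ "\n") mensagem
        if membros.isEmpty then mensagem ++ "-x-\n" else mensagem) m := by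
  induction rng with
  | nil => intro m; rfl
  | cons c rng ih =>
    intro m
    rw [List.foldl_cons, List.foldl_cons, ih]
    congr 1
    simp only [pv_inner_eq, hg, Bool.true_and, List.isEmpty_map]

-- ===== VERDICT (by name: the statement is the Claim_ definition above) =====
theorem formatar_mensagem_integrantes_spec : Claim_equal_formatar_mensagem_integrantes := by
  intro integrantes _
  unfold Spec_formatar_mensagem_integrantes
  unfold formatar_mensagem_integrantes formatar_mensagem_integrantes_alt
  exact pv_fold_eq integrantes _ (fun c => by rw [pv_grupos_getD]; simp) _ _
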